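-- pv_equiv track=rewrite | github.com/dwangus/Maximum-Clique-Problem-Experiments | test8.4_numpy.py | antiGraph
-- ===== SOURCE A (Python) =====
-- def antiGraph(graph):
--     antiG = {}
--     for key in graph.keys():
--         neighbors = graph[key]
--         nonNeigh = []
--         for key2 in graph.keys():
--             if key2 != key:
--                 if key2 not in neighbors:
--                     nonNeigh.append(key2)
--         antiG[key] = nonNeigh
--     return antiG
-- ===== SOURCE B (Python) =====
-- def antiGraph(graph):
--     keys = list(graph.keys())
--     antiG = {key: [k for k in keys if k != key] for key in keys}
--     for key in keys:
--         lst = antiG[key]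
--         for n in graph[key]:
--             if n in lst:
--                 lst.remove(n)
--     return antiG
-- ===== Notes on version B (the rewrite author's own statement) =====
-- stated objective: alternative
-- what changed: A builds each complement row by scanning all keys and testing membership in the neighbor list; B first builds the complete row (all other keys) for every key and then subtracts each neighbor by a guarded list.remove, so the inner loop ranges over the neighbor list instead of over all keys.
import Mathlib
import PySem

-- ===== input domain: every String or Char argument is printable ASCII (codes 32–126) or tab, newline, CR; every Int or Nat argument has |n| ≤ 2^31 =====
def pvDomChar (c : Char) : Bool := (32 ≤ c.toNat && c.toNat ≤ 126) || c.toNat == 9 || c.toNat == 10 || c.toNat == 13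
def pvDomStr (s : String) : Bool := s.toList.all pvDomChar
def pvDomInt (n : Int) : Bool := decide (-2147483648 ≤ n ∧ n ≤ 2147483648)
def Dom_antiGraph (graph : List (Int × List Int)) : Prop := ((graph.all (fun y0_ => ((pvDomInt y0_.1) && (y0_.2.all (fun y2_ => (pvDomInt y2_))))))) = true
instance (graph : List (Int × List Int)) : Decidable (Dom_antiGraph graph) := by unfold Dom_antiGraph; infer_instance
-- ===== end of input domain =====

-- B builds the complete row of all other keys first and then subtracts each neighbor by a
-- guarded remove, instead of A's scan-all-keys-and-test-membership; alternative decomposition,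
-- equivalence proved on the return value.

-- ===== PORT A =====
-- A: for each key, scan all keys and keep those that are neither the key nor a neighbor.
def antiGraph (graph : List (Int × List Int)) : List (Int × List Int) :=
  let g := PySem.Dict.mk graph
  (g.keys.foldl (fun antiG key =>
      let neighbors := g.getD key []
      let nonNeigh := g.keys.foldl (fun acc k2 =>
          if k2 ≠ key then (if k2 ∈ neighbors then acc else acc ++ [k2]) else acc)
        ([] : List Int)
      antiG.insert key nonNeigh) PySem.Dict.empty).items

-- ===== PORT B =====
-- B: first pass gives every key the full list of all other keys; second pass removes each
-- neighbor (guarded membership test before remove, as in Source B).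
def antiGraph_alt (graph : List (Int × List Int)) : List (Int × List Int) :=
  let g := PySem.Dict.mk graph
  let keys := g.keys
  let antiG := keys.foldl
      (fun d key => d.insert key (keys.filter (fun k => decide (k ≠ key)))) PySem.Dict.empty
  let antiG2 := keys.foldl
      (fun d key => d.modify key [] (fun lst =>
        (g.getD key []).foldl (fun lst n => if n ∈ lst then lst.erase n else lst) lst)) antiG
  antiG2.items

-- ===== PRECONDITION & SPEC =====
-- Pre_: the association list encodes a Python dict, whose keys are necessarily unique; every
-- input the Python A accepts satisfies this (nothing A returns on is excluded).
def Pre_antiGraph (graph : List (Int × List Int)) : Prop := (graph.map Prod.fst).Nodup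
instance (graph : List (Int × List Int)) : Decidable (Pre_antiGraph graph) := by unfold Pre_antiGraph; infer_instance
def pvWitness_antiGraph : (List (Int × List Int)) := [(0, [1]), (1, [0]), (2, [])]

def Spec_antiGraph (graph : List (Int × List Int)) (out : List (Int × List Int)) : Prop := out = antiGraph_alt graph
instance (graph : List (Int × List Int)) (out : List (Int × List Int)) : Decidable (Spec_antiGraph graph out) := by unfold Spec_antiGraph; infer_instance

-- ===== CLAIM (what is proved, stated in full; the proofs are below) =====
def Claim_equal_antiGraph : Prop := ∀ (graph : List (Int × List Int)), Dom_antiGraph graph → Pre_antiGraph graph → Spec_antiGraph graph (antiGraph graph)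

-- ===== LEMMAS AND PROOFS =====

-- lookup is unchanged by an insert-loop over keys not equal to k
theorem getD_foldl_insert_not_mem (l : List Int) (f : Int → List Int)
    (d : PySem.Dict Int (List Int)) (k : Int) (dflt : List Int) (h : k ∉ l) :
    (l.foldl (fun d x => d.insert x (f x)) d).getD k dflt = d.getD k dflt := by
  induction l generalizing d with
  | nil => rfl
  | cons x xs ih =>
      simp only [List.foldl_cons]
      rw [ih _ (fun hk => h (List.mem_cons_of_mem _ hk)),
          PySem.Dict.getD_insert_of_ne _ _ _ (by intro he; exact h (he ▸ List.mem_cons_self))]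

-- lookup after an insert-loop over distinct keys returns that key's inserted value
theorem getD_foldl_insert_mem (l : List Int) (f : Int → List Int)
    (d : PySem.Dict Int (List Int)) (k : Int) (dflt : List Int)
    (hnd : l.Nodup) (h : k ∈ l) :
    (l.foldl (fun d x => d.insert x (f x)) d).getD k dflt = f k := by
  induction l generalizing d with
  | nil => cases h
  | cons x xs ih =>
      simp only [List.foldl_cons]
      rcases List.mem_cons.mp h with rfl | hk
      · rw [getD_foldl_insert_not_mem _ _ _ _ _ ((List.nodup_cons.mp hnd).1),
            PySem.Dict.getD_insert_self]
      · exact ih _ (List.Nodup.of_cons hnd) hk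

-- lookup unchanged by a modify-loop over keys not equal to k
theorem getD_foldl_modify_not_mem (l : List Int) (g : Int → List Int → List Int)
    (d : PySem.Dict Int (List Int)) (k : Int) (dflt : List Int) (h : k ∉ l) :
    (l.foldl (fun d x => d.modify x dflt (g x)) d).getD k dflt = d.getD k dflt := by
  induction l generalizing d with
  | nil => rfl
  | cons x xs ih =>
      simp only [List.foldl_cons]
      rw [ih _ (fun hk => h (List.mem_cons_of_mem _ hk)),
          PySem.Dict.getD_modify_of_ne _ _ _ (by intro he; exact h (he ▸ List.mem_cons_self))]

-- lookup after a modify-loop over distinct keys applies that key's function once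
theorem getD_foldl_modify_mem (l : List Int) (g : Int → List Int → List Int)
    (d : PySem.Dict Int (List Int)) (k : Int) (dflt : List Int)
    (hnd : l.Nodup) (h : k ∈ l) :
    (l.foldl (fun d x => d.modify x dflt (g x)) d).getD k dflt = g k (d.getD k dflt) := by
  induction l generalizing d with
  | nil => cases h
  | cons x xs ih =>
      simp only [List.foldl_cons]
      rcases List.mem_cons.mp h with rfl | hk
      · rw [getD_foldl_modify_not_mem _ _ _ _ _ ((List.nodup_cons.mp hnd).1),
            PySem.Dict.getD_modify_self]
      · rw [ih _ (List.Nodup.of_cons hnd) hk,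
            PySem.Dict.getD_modify_of_ne _ _ _
              (fun he => ((List.nodup_cons.mp hnd).1) (by rwa [← he]))]

-- A's inner append-loop is a filter
theorem foldl_nonNeigh (keys : List Int) (key : Int) (ns : List Int) (acc : List Int) :
    keys.foldl (fun acc k2 =>
        if k2 ≠ key then (if k2 ∈ ns then acc else acc ++ [k2]) else acc) acc
      = acc ++ keys.filter (fun k2 => decide (k2 ≠ key ∧ k2 ∉ ns)) := by
  induction keys generalizing acc with
  | nil => simp
  | cons x xs ih =>
      rw [List.foldl_cons, List.filter_cons]
      by_cases h1 : x = key
      · rw [if_neg (not_not_intro h1), ih,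
            if_neg (by simp [h1])]
      · by_cases h2 : x ∈ ns
        · rw [if_pos (show x ≠ key from h1), if_pos h2, ih,
              if_neg (by simp [h2])]
        · rw [if_pos (show x ≠ key from h1), if_neg h2, ih,
              if_pos (by simp [h1, h2]), List.append_assoc]
          rfl

-- B's guarded remove-loop on a duplicate-free list is a filter
theorem foldl_erase_eq_filter (ns : List Int) (l : List Int) (hnd : l.Nodup) :
    ns.foldl (fun lst n => if n ∈ lst then lst.erase n else lst) l
      = l.filter (fun x => decide (x ∉ ns)) := by
  induction ns generalizing l with
  | nil => simp
  | cons n ns ih =>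
      simp only [List.foldl_cons]
      have he : (if n ∈ l then l.erase n else l) = l.erase n := by
        split
        · rfl
        · rw [List.erase_of_not_mem ‹n ∉ l›]
      rw [he, ih _ (List.Nodup.erase n hnd), List.Nodup.erase_eq_filter hnd,
          List.filter_filter]
      apply List.filter_congr
      intro x _
      by_cases hx : x = n <;> simp [hx]

-- keys of a foldl-insert over the whole key list, from empty
theorem keys_after_insert_loop (keys : List Int) (f : Int → List Int)
    (hnd : keys.Nodup) :
    (keys.foldl (fun d key => d.insert key (f key)) PySem.Dict.empty).keys = keys := by
  rw [PySem.Dict.keys_foldl_insert]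
  simp only [PySem.Dict.keys_empty, PySem.Set.update_nil_left]
  exact PySem.Set.ofList_eq_self_of_nodup _ hnd

theorem antiGraph_spec : Claim_equal_antiGraph := by
  intro graph _ hpre
  unfold Spec_antiGraph antiGraph antiGraph_alt
  simp only []
  set g := PySem.Dict.mk graph with hg
  have hkeys : g.keys = graph.map Prod.fst := rfl
  have hnd : g.keys.Nodup := by rw [hkeys]; exact hpre
  -- names for the three loop results
  set fA : Int → List Int := fun key =>
    g.keys.foldl (fun acc k2 =>
        if k2 ≠ key then (if k2 ∈ g.getD key [] then acc else acc ++ [k2]) else acc) []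
    with hfA
  set dA := g.keys.foldl (fun antiG key => antiG.insert key (fA key)) PySem.Dict.empty with hdA
  set fB : Int → List Int := fun key => g.keys.filter (fun k => decide (k ≠ key)) with hfB
  set dB1 := g.keys.foldl (fun d key => d.insert key (fB key)) PySem.Dict.empty with hdB1
  set gB : Int → List Int → List Int := fun key lst =>
    (g.getD key []).foldl (fun lst n => if n ∈ lst then lst.erase n else lst) lst with hgB
  set dB2 := g.keys.foldl (fun d key => d.modify key [] (gB key)) dB1 with hdB2
  have hkA : dA.keys = g.keys := keys_after_insert_loop _ _ hnd
  have hkB1 : dB1.keys = g.keys := keys_after_insert_loop _ _ hnd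
  have hkB2 : dB2.keys = g.keys := by
    rw [hdB2, PySem.Dict.keys_foldl_modify, hkB1]
    rw [PySem.Set.update_eq_append_filter]
    have hnil : (PySem.Set.ofList g.keys).filter (fun y => !(PySem.Set.contains g.keys y)) = [] := by
      apply List.filter_eq_nil_iff.mpr
      intro a ha
      have hm : a ∈ g.keys := (PySem.Set.mem_ofList _ _).mp ha
      simpa using hm
    rw [hnil, List.append_nil]
  have hndA : dA.keys.Nodup := hkA ▸ hnd
  have hndB2 : dB2.keys.Nodup := hkB2 ▸ hnd
  rw [PySem.Dict.items_eq_map_keys dA hndA [], PySem.Dict.items_eq_map_keys dB2 hndB2 [],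
      hkA, hkB2]
  apply List.map_congr_left
  intro key hkey
  refine congrArg _ ?_
  have hA : dA.getD key [] = fA key := getD_foldl_insert_mem _ _ _ _ _ hnd hkey
  have hB2 : dB2.getD key [] = gB key (dB1.getD key []) :=
    getD_foldl_modify_mem _ _ _ _ _ hnd hkey
  have hB1 : dB1.getD key [] = fB key := getD_foldl_insert_mem _ _ _ _ _ hnd hkey
  rw [hA, hB2, hB1, hfA, hfB, hgB]
  simp only []
  rw [foldl_nonNeigh, List.nil_append,
      foldl_erase_eq_filter _ _ (List.Nodup.filter _ hnd), List.filter_filter]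
  apply List.filter_congr
  intro x _
  by_cases h1 : x = key <;> by_cases h2 : x ∈ g.getD key [] <;> simp [h1, h2]
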